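-- pv_equiv track=rewrite | github.com/eerovil/musescore-choir-plugins | rename_parts.py | build_part_names
-- ===== SOURCE A (Python) =====
-- from typing import List, Tuple
--
-- PART_FULL_NAMES = {
--     "S": "Soprano",
--     "A": "Alto",
--     "T": "Tenor",
--     "B": "Bass",
--     "M": "Men",
--     "W": "Women",
-- }
--
-- PART_SHORT_PREFIX = {
--     "S": "S",
--     "A": "A",
--     "T": "T",
--     "B": "B",
--     "M": "M",
--     "W": "W",
-- }
--
-- def parse_part_string(part_string: str) -> List[str]:
--     """
--     Parse a part string like 'SSAA' or 'SSSSAA' into a list of letters (one per part).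
--     Raises ValueError on invalid characters.
--     """
--     part_string = part_string.strip().upper()
--     if not part_string:
--         raise ValueError("part_string must not be empty")
--     valid = set(PART_FULL_NAMES)
--     for c in part_string:
--         if c not in valid:
--             raise ValueError(f"Invalid part letter: {c!r}. Allowed: S, A, T, B, M, W")
--     return list(part_string)
--
-- def part_names_for_run(letter: str, run_length: int) -> List[Tuple[str, str]]:
--     """
--     For a run of the same letter, return [(short_name, full_name), ...].
--     - 1 part: S1 / Soprano 1
--     - 2 parts: S1, S2 / Soprano 1, Soprano 2
--     - 3+ parts: pairs with -1, -2 (S1-1, S1-2, S2-1, S2-2, ...); last can be single (S2).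
--     """
--     prefix = PART_SHORT_PREFIX[letter]
--     full_base = PART_FULL_NAMES[letter]
--     result: List[Tuple[str, str]] = []
--     use_pairs = run_length >= 3
--     for k in range(run_length):
--         if use_pairs:
--             group = k // 2 + 1
--             if k % 2 == 1:
--                 short_name = f"{prefix}{group}-2"
--                 full_name = f"{full_base} {group}-2"
--             elif k + 1 < run_length:
--                 short_name = f"{prefix}{group}-1"
--                 full_name = f"{full_base} {group}-1"
--             else:
--                 short_name = f"{prefix}{group}"
--                 full_name = f"{full_base} {group}"
--         else:
--             num = k + 1
--             short_name = f"{prefix}{num}"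
--             full_name = f"{full_base} {num}"
--         result.append((short_name, full_name))
--     return result
--
-- def build_part_names(part_string: str) -> List[Tuple[str, str]]:
--     """
--     Build list of (short_name, full_name) for each part from part_string.
--     E.g. 'SSSSAA' -> [(S1-1, Soprano 1-1), (S1-2, ...), (S2-1, ...), (S2-2, ...), (A1, Alto 1), (A2, Alto 2)].
--     """
--     letters = parse_part_string(part_string)
--     names: List[Tuple[str, str]] = []
--     i = 0
--     while i < len(letters):
--         letter = letters[i]
--         run_length = 0
--         while i + run_length < len(letters) and letters[i + run_length] == letter:
--             run_length += 1
--         names.extend(part_names_for_run(letter, run_length))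
--         i += run_length
--     return names
-- ===== SOURCE B (Python) =====
-- from typing import List, Tuple
-- from itertools import groupby
--
-- PART_FULL_NAMES = {
--     "S": "Soprano",
--     "A": "Alto",
--     "T": "Tenor",
--     "B": "Bass",
--     "M": "Men",
--     "W": "Women",
-- }
--
--
-- def build_part_names(part_string: str) -> List[Tuple[str, str]]:
--     s = part_string.strip().upper()
--     if not s:
--         raise ValueError("part_string must not be empty")
--     for c in s:
--         if c not in PART_FULL_NAMES:
--             raise ValueError(f"Invalid part letter: {c!r}. Allowed: S, A, T, B, M, W")
--     names: List[Tuple[str, str]] = []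
--     for letter, grp in groupby(s):
--         n = sum(1 for _ in grp)
--         base = PART_FULL_NAMES[letter]
--         if n < 3:
--             for k in range(1, n + 1):
--                 names.append((f"{letter}{k}", f"{base} {k}"))
--         else:
--             pairs = n // 2
--             for g in range(1, pairs + 1):
--                 names.append((f"{letter}{g}-1", f"{base} {g}-1"))
--                 names.append((f"{letter}{g}-2", f"{base} {g}-2"))
--             if n % 2 == 1:
--                 names.append((f"{letter}{pairs + 1}", f"{base} {pairs + 1}"))
--     return names
-- ===== Notes on version B (the rewrite author's own statement) =====
-- stated objective: alternative
-- what changed: Replaces A's index-by-index naming loop (per-element k//2 / k%2 / last-element branching) by group-by-group emission: each run emits its pairs g=1..n//2 directly plus an optional trailing single, with the runs obtained via itertools.groupby instead of a hand-written index scan.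
import Mathlib
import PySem

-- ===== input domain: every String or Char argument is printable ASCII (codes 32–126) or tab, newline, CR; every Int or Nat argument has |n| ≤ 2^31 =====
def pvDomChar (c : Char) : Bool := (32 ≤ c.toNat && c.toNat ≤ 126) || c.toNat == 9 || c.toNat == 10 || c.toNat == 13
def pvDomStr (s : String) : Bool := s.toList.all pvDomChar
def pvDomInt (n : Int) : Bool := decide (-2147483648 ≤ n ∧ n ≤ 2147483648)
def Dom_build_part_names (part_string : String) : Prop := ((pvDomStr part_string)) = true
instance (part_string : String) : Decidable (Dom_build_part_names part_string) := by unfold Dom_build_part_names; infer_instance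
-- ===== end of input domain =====

-- B renames runs group-by-group (pairs then optional single) instead of A's per-index k//2 branching; same values, alternative decomposition.
-- Both Pythons raise ValueError on the same inputs (empty after strip, or invalid letter); Pre_ excludes exactly those.

-- ===== PORT A =====
-- PART_FULL_NAMES lookup (shared constant table of the module)
def pvFullName (c : Char) : String :=
  if c = 'S' then "Soprano" else if c = 'A' then "Alto" else if c = 'T' then "Tenor"
  else if c = 'B' then "Bass" else if c = 'M' then "Men"
  else if c = 'W' then "Women" else ""

-- part_names_for_run: per-index loop with k//2 grouping
def pvPnrA (letter : Char) (run_length : Nat) : List (String × String) :=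
  let pre := String.singleton letter   -- PART_SHORT_PREFIX[letter]
  let base := pvFullName letter
  let use_pairs := 3 ≤ run_length
  (List.range run_length).foldl (fun result k =>
    result ++ [ if use_pairs then
        let group := k / 2 + 1
        if k % 2 = 1 then (pre ++ toString group ++ "-2", base ++ " " ++ toString group ++ "-2")
        else if k + 1 < run_length then (pre ++ toString group ++ "-1", base ++ " " ++ toString group ++ "-1")
        else (pre ++ toString group, base ++ " " ++ toString group)
      else (pre ++ toString (k+1), base ++ " " ++ toString (k+1)) ]) []

-- inner while loop of build_part_names: count of consecutive equal letters from the current index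
def pvCountRun (c : Char) : List Char → Nat
  | [] => 0
  | x :: xs => if x = c then pvCountRun c xs + 1 else 0

theorem pvCountRun_cons_self (c : Char) (xs : List Char) :
    pvCountRun c (c :: xs) = pvCountRun c xs + 1 := by simp [pvCountRun]

-- outer while loop of build_part_names
def pvRunsA : List Char → List (String × String)
  | [] => []
  | c :: rest =>
      pvPnrA c (pvCountRun c (c :: rest)) ++ pvRunsA ((c :: rest).drop (pvCountRun c (c :: rest)))
termination_by xs => xs.length
decreasing_by
  simp [pvCountRun_cons_self, List.length_drop]

def build_part_names (part_string : String) : List (String × String) :=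
  pvRunsA (PySem.Chars.upper (PySem.Chars.strip part_string.toList))

-- ===== PORT B =====
-- itertools.groupby over the letters: run-length pairs in order
def pvGroupRuns : List Char → List (Char × Nat)
  | [] => []
  | c :: rest =>
      (c, (rest.takeWhile (· == c)).length + 1) :: pvGroupRuns (rest.dropWhile (· == c))
termination_by xs => xs.length
decreasing_by
  have := List.length_dropWhile_le (· == c) rest
  simp
  omega

-- group-by-group emission: pairs g = 1..n/2, then an optional trailing single
def pvEmitB (c : Char) (n : Nat) : List (String × String) :=
  let l := String.singleton c
  let base := pvFullName c
  if n < 3 then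
    (List.range' 1 n).map (fun k => (l ++ toString k, base ++ " " ++ toString k))
  else
    let pairs := n / 2
    ((List.range' 1 pairs).flatMap (fun g =>
       [(l ++ toString g ++ "-1", base ++ " " ++ toString g ++ "-1"),
        (l ++ toString g ++ "-2", base ++ " " ++ toString g ++ "-2")])) ++
    (if n % 2 = 1 then [(l ++ toString (pairs+1), base ++ " " ++ toString (pairs+1))] else [])

def build_part_names_alt (part_string : String) : List (String × String) :=
  (pvGroupRuns (PySem.Chars.upper (PySem.Chars.strip part_string.toList))).flatMap
    (fun p => pvEmitB p.1 p.2)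

-- ===== PRECONDITION & SPEC =====
-- Pre_ excludes exactly the inputs on which A raises ValueError: empty after strip()/upper(), or a non-SATBMW letter.
def Pre_build_part_names (part_string : String) : Prop :=
  let t := PySem.Chars.upper (PySem.Chars.strip part_string.toList)
  t ≠ [] ∧ t.all (fun c => (['S','A','T','B','M','W'] : List Char).contains c) = true
instance (part_string : String) : Decidable (Pre_build_part_names part_string) := by
  unfold Pre_build_part_names; infer_instance

def pvWitness_build_part_names : String := " sSaATTTbb\n"

def Spec_build_part_names (part_string : String) (out : List (String × String)) : Prop := out = build_part_names_alt part_string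
instance (part_string : String) (out : List (String × String)) : Decidable (Spec_build_part_names part_string out) := by unfold Spec_build_part_names; infer_instance

-- ===== CLAIM (what is proved, stated in full; the proofs are below) =====
def Claim_equal_build_part_names : Prop := ∀ (part_string : String), Dom_build_part_names part_string → Pre_build_part_names part_string → Spec_build_part_names part_string (build_part_names part_string)

-- ===== LEMMAS AND PROOFS =====

-- foldl append singles = map
theorem pvFoldlApp (f : Nat → α) (l : List Nat) (init : List α) :
    l.foldl (fun r k => r ++ [f k]) init = init ++ l.map f := by
  induction l generalizing init with
  | nil => simp
  | cons x xs ih => simp [ih]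

-- pair part
theorem pvPairPart (l base : String) (m : Nat) :
    (List.range (2*m)).map (fun k =>
      if k % 2 = 1 then (l ++ toString (k/2+1) ++ "-2", base ++ " " ++ toString (k/2+1) ++ "-2")
      else (l ++ toString (k/2+1) ++ "-1", base ++ " " ++ toString (k/2+1) ++ "-1"))
    = (List.range' 1 m).flatMap (fun g =>
       [(l ++ toString g ++ "-1", base ++ " " ++ toString g ++ "-1"),
        (l ++ toString g ++ "-2", base ++ " " ++ toString g ++ "-2")]) := by
  induction m with
  | zero => simp
  | succ m ih =>
      have h1 : 2*(m+1) = (2*m+1)+1 := by ring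
      rw [h1, List.range_succ, List.range_succ, List.map_append, List.map_append, ih,
          List.range'_concat]
      have e1 : (2*m) % 2 = 0 := by omega
      have e2 : (2*m+1) % 2 = 1 := by omega
      have e3 : (2*m) / 2 = m := by omega
      have e4 : (2*m+1) / 2 = m := by omega
      simp [e1, e2, e3, e4, Nat.add_comm 1 m]

theorem pvEmit_eq (c : Char) (n : Nat) : pvPnrA c n = pvEmitB c n := by
  unfold pvPnrA pvEmitB
  rw [pvFoldlApp]
  by_cases h3 : n < 3
  · simp only [List.nil_append, if_pos h3]
    have : ¬ 3 ≤ n := by omega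
    simp only [this, if_false]
    interval_cases n <;> rfl
  · have hge : 3 ≤ n := by omega
    simp only [List.nil_append, if_neg h3, if_pos hge]
    rcases Nat.even_or_odd n with ⟨m, hm⟩ | ⟨m, hm⟩
    · -- even: n = m + m
      have hm2 : n = 2*m := by omega
      subst hm2
      have hpairs : 2*m / 2 = m := by omega
      have hmod : ¬ (2*m) % 2 = 1 := by omega
      rw [if_neg hmod, List.append_nil, hpairs]
      rw [← pvPairPart (String.singleton c) (pvFullName c) m]
      apply List.map_congr_left
      intro k hk
      rw [List.mem_range] at hk
      by_cases hodd : k % 2 = 1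
      · simp [hodd]
      · have : k + 1 < 2*m := by omega
        simp [hodd, this]
    · -- odd: n = 2*m + 1
      subst hm
      have hpairs : (2*m+1) / 2 = m := by omega
      have hmod : (2*m+1) % 2 = 1 := by omega
      rw [if_pos hmod, hpairs,
          show List.range (2*m+1) = List.range (2*m) ++ [2*m] from List.range_succ,
          List.map_append]
      congr 1
      · rw [← pvPairPart (String.singleton c) (pvFullName c) m]
        apply List.map_congr_left
        intro k hk
        rw [List.mem_range] at hk
        by_cases hodd : k % 2 = 1
        · simp [hodd]
        · have : k + 1 < 2*m + 1 := by omega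
          simp [hodd, this]
      · have hlast : ¬ (2*m) % 2 = 1 := by omega
        have h2 : ¬ (2*m + 1 < 2*m + 1) := by omega
        have h3' : (2*m)/2 = m := by omega
        simp [h3']

theorem pvCountRun_eq_takeWhile (c : Char) (xs : List Char) :
    pvCountRun c xs = (xs.takeWhile (· == c)).length := by
  induction xs with
  | nil => simp [pvCountRun]
  | cons x xs ih =>
      by_cases h : x = c <;> simp [pvCountRun, h, ih]

theorem pvDrop_takeWhile (p : Char → Bool) (xs : List Char) :
    xs.drop ((xs.takeWhile p).length) = xs.dropWhile p := by
  induction xs with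
  | nil => simp
  | cons x xs ih => by_cases h : p x <;> simp [h, ih]

theorem pvRuns_eq (xs : List Char) : pvRunsA xs = (pvGroupRuns xs).flatMap (fun p => pvEmitB p.1 p.2) := by
  induction xs using pvGroupRuns.induct with
  | case1 => simp [pvRunsA, pvGroupRuns]
  | case2 c rest ih =>
      rw [pvRunsA, pvGroupRuns, pvCountRun_cons_self, pvCountRun_eq_takeWhile,
          List.drop_succ_cons, pvDrop_takeWhile, List.flatMap_cons, pvEmit_eq, ih]

-- ===== VERDICT (by name: the statement is the Claim_ definition above) =====
theorem build_part_names_spec : Claim_equal_build_part_names := by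
  intro s _ _
  unfold Spec_build_part_names build_part_names build_part_names_alt
  exact pvRuns_eq _
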